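-- pv_equiv track=rewrite | github.com/ParsiSatya3800/DSA-in-Python | CheckiftheArrayisSorted.py | check
-- ===== SOURCE A (Python) =====
-- from typing import List
--
-- def check(nums: List[int]) -> bool:
--     n = len(nums)
--     rotations = 0
--     for i in range(0, len(nums)):
--         if nums[i] > nums[(i + 1) % n]:
--             rotations += 1
--         if rotations > 1:
--             return False
--     return True
-- ===== SOURCE B (Python) =====
-- def check(nums):
--     n = len(nums)
--     if n == 0:
--         return True
--     s = sorted(nums)
--     doubled = s + s
--     return any(doubled[i:i + n] == nums for i in range(n))
-- ===== Notes on version B (the rewrite author's own statement) =====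
-- stated objective: alternative
-- what changed: Instead of counting circular descents with a modulo-indexed loop, B checks whether nums is a rotation of its sorted version by scanning sorted(nums)+sorted(nums) for nums as a contiguous slice.
import Mathlib
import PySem

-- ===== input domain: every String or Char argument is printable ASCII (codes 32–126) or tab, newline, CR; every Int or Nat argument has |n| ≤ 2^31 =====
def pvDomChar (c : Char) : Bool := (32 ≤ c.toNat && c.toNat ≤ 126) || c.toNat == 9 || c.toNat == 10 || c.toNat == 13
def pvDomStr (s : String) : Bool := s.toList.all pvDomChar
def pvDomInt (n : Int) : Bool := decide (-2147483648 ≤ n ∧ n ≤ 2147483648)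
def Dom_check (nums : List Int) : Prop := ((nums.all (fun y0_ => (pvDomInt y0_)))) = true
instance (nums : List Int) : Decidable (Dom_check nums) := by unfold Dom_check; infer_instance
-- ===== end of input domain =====

-- B re-implements A's circular-descent count as "nums is a rotation of sorted(nums)" (alternative algorithm, no speed claim).

-- ===== PORT A =====
-- A's loop: remaining indices, running `rotations`; `return False` as soon as rotations > 1.
-- Indices fed to pyGetD are always in range (i ∈ range(n), (i+1) % n), so the default is never read.
def checkGo (nums : List Int) (n : Int) (rotations : Int) : List Int → Bool
  | [] => true
  | i :: rest =>
      let r := if PySem.List.pyGetD nums (PySem.Int.mod (i + 1) n) 0 < PySem.List.pyGetD nums i 0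
               then rotations + 1 else rotations
      if 1 < r then false else checkGo nums n r rest

def check (nums : List Int) : Bool :=
  let n := PySem.List.len nums
  checkGo nums n 0 (PySem.List.pyRange 0 (PySem.List.len nums) 1)

-- ===== PORT B =====
def check_alt (nums : List Int) : Bool :=
  let n := PySem.List.len nums
  if n == 0 then true
  else
    let s := PySem.List.sorted nums (fun x => x) false
    let doubled := s ++ s
    (PySem.List.pyRange 0 n 1).any (fun i => PySem.List.slice doubled (some i) (some (i + n)) == nums)

-- ===== PRECONDITION & SPEC =====
def Spec_check (nums : List Int) (out : Bool) : Prop := out = check_alt nums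
instance (nums : List Int) (out : Bool) : Decidable (Spec_check nums out) := by unfold Spec_check; infer_instance

-- ===== CLAIM (what is proved, stated in full; the proofs are below) =====
def Claim_equal_check : Prop := ∀ (nums : List Int), Dom_check nums → Spec_check nums (check nums)

-- ===== LEMMAS AND PROOFS =====

-- a circular descent pair
def desc (p : Int × Int) : Bool := decide (p.2 < p.1)

-- number of circular descents: pairs (l[k], l[(k+1) % n])
def cdesc (l : List Int) : Nat := (l.zip (l.rotate 1)).countP desc

-- the Nat-index condition A's loop tests at index k
def descAt (l : List Int) (k : Nat) : Bool := decide (l.getD ((k + 1) % l.length) 0 < l.getD k 0)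

-- ---- A-side characterisation ----

theorem checkGo_iff (nums : List Int) (ks : List Nat) : ∀ (r : Int), 0 ≤ r → r ≤ 1 →
    (checkGo nums (nums.length : Int) r (ks.map (fun k : Nat => (k : Int))) = true ↔
      r + (ks.countP (descAt nums) : Int) ≤ 1) := by
  induction ks with
  | nil => intro r h0 h1; simp [checkGo]; omega
  | cons k ks ih =>
    intro r h0 h1
    have hidx : PySem.Int.mod ((k : Int) + 1) (nums.length : Int) = (((k + 1) % nums.length : Nat) : Int) := by
      rw [show ((k : Int) + 1) = ((k + 1 : Nat) : Int) by push_cast; ring, PySem.Int.mod_natCast]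
    simp only [List.map_cons, checkGo, hidx, PySem.List.pyGetD_natCast]
    by_cases hd : nums.getD ((k + 1) % nums.length) 0 < nums.getD k 0
    · simp only [if_pos hd]
      by_cases hr : (1 : Int) < r + 1
      · simp only [if_pos hr]
        have : descAt nums k = true := by unfold descAt; exact decide_eq_true hd
        simp [this]; omega
      · simp only [if_neg hr]
        rw [ih (r + 1) (by omega) (by omega)]
        have : descAt nums k = true := by unfold descAt; exact decide_eq_true hd
        simp [this]; omega
    · simp only [if_neg hd]
      have hr : ¬ (1 : Int) < r := by omega
      simp only [if_neg hr]
      rw [ih r h0 h1]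
      have : descAt nums k = false := by unfold descAt; exact decide_eq_false hd
      simp [this]

theorem check_eq_cdescN (nums : List Int) :
    check nums = decide (((List.range nums.length).countP (descAt nums)) ≤ 1) := by
  have h := checkGo_iff nums (List.range nums.length) 0 (le_refl 0) (by omega)
  rw [zero_add] at h
  unfold check
  simp only [PySem.List.len_eq, PySem.List.pyRange_zero_natCast]
  by_cases hc : (List.range nums.length).countP (descAt nums) ≤ 1
  · rw [h.mpr (by exact_mod_cast hc)]; simp [hc]
  · have hb : ¬ checkGo nums (nums.length : Int) 0 ((List.range nums.length).map (fun k : Nat => (k : Int))) = true := by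
      intro ht; exact hc (by exact_mod_cast h.mp ht)
    simp only [decide_eq_false hc]
    exact Bool.not_eq_true _ ▸ (Bool.eq_false_iff.mpr (fun he => hb he))

-- zip l (l.rotate 1) as a map over range
theorem zip_rot_eq_map (l : List Int) :
    l.zip (l.rotate 1) = (List.range l.length).map (fun k => (l.getD k 0, l.getD ((k + 1) % l.length) 0)) := by
  apply List.ext_getElem
  · simp
  · intro i h1 h2
    have hlen : i < l.length := by simp at h1; omega
    have hmod : (i + 1) % l.length < l.length := Nat.mod_lt _ (by omega)
    have hrot : i < (l.rotate 1).length := by simpa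
    simp only [List.getElem_zip, List.getElem_map, List.getElem_range]
    rw [List.getElem_rotate l 1 i hrot, List.getD_eq_getElem l 0 hlen, List.getD_eq_getElem l 0 hmod]

theorem check_eq_cdesc (nums : List Int) : check nums = decide (cdesc nums ≤ 1) := by
  rw [check_eq_cdescN]
  unfold cdesc
  rw [zip_rot_eq_map, List.countP_map]
  congr 1

-- ---- B-side characterisation ----

theorem slice_doubled (s : List Int) (i : Int) (h0 : 0 ≤ i) (hi : i < (s.length : Int)) :
    PySem.List.slice (s ++ s) (some i) (some (i + (s.length : Int))) = s.rotate i.toNat := by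
  rw [PySem.List.slice_toNat (s ++ s) (a := i) (b := i + (s.length : Int)) h0 (by omega)]
  have h1 : (i + (s.length : Int)).toNat - i.toNat = s.length := by omega
  rw [h1, List.drop_append_of_le_length (by omega), List.take_append,
      List.rotate_eq_drop_append_take (by omega)]
  congr 1
  · exact List.take_of_length_le (by simp)
  · congr 1
    simp
    omega

theorem check_alt_iff (nums : List Int) (h : nums ≠ []) :
    check_alt nums = true ↔
      ∃ j : Nat, j < nums.length ∧ (PySem.List.sorted nums (fun x => x) false).rotate j = nums := by
  have hnum : ¬ ((nums.length : Int) == 0) = true := by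
    simp only [beq_iff_eq]
    intro h0
    exact h (List.length_eq_zero_iff.mp (by exact_mod_cast h0))
  unfold check_alt
  simp only [PySem.List.len_eq, if_neg hnum]
  rw [List.any_eq_true]
  have hslen : (PySem.List.sorted nums (fun x => x) false).length = nums.length :=
    PySem.List.length_sorted _ _ _
  have hcast : ((nums.length : Int)) = ((PySem.List.sorted nums (fun x => x) false).length : Int) := by
    exact_mod_cast hslen.symm
  constructor
  · rintro ⟨i, hi, hP⟩
    rw [PySem.List.mem_pyRange_one] at hi
    refine ⟨i.toNat, by omega, ?_⟩
    have hP' := beq_iff_eq.mp hP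
    rw [hcast, slice_doubled _ i hi.1 (by omega)] at hP'
    exact hP'
  · rintro ⟨j, hj, hrot⟩
    refine ⟨(j : Int), ?_, ?_⟩
    · rw [PySem.List.mem_pyRange_one]
      constructor
      · positivity
      · exact_mod_cast hj
    · apply beq_iff_eq.mpr
      rw [hcast, slice_doubled _ (j : Int) (by positivity) (by omega)]
      simpa using hrot

-- ---- the mathematical core ----

theorem zip_rotate (a b : List Int) (hl : a.length = b.length) (j : Nat) (hj : j ≤ a.length) :
    (a.rotate j).zip (b.rotate j) = (a.zip b).rotate j := by
  rw [List.rotate_eq_drop_append_take hj, List.rotate_eq_drop_append_take (hl ▸ hj),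
      List.rotate_eq_drop_append_take (by simp [List.length_zip]; omega),
      List.zip_append (by simp [hl])]
  simp [List.zip_eq_zipWith, List.drop_zipWith, List.take_zipWith]

theorem cdesc_rotate (l : List Int) (j : Nat) (hj : j ≤ l.length) :
    cdesc (l.rotate j) = cdesc l := by
  unfold cdesc
  have h1 : (l.rotate j).rotate 1 = (l.rotate 1).rotate j := by
    rw [List.rotate_rotate, List.rotate_rotate, Nat.add_comm]
  rw [h1, zip_rotate l (l.rotate 1) (by simp) j hj, (List.rotate_perm _ _).countP_eq]

-- adjacent-descent count is zero iff the list is sorted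
theorem zip_tail_zero_iff : ∀ (l : List Int), ((l.zip l.tail).countP desc = 0 ↔ l.Pairwise (· ≤ ·))
  | [] => by simp
  | [x] => by simp
  | x :: y :: t => by
    have ih := zip_tail_zero_iff (y :: t)
    simp only [List.tail_cons, List.zip_cons_cons, List.countP_cons] at *
    constructor
    · intro h
      have hd : desc (x, y) = false := by
        cases hdesc : desc (x, y) <;> simp [hdesc] at h ⊢
      have h0 : ((y :: t).zip t).countP desc = 0 := by
        rw [hd] at h; simpa using h
      have hp := ih.mp h0
      refine List.pairwise_cons.mpr ⟨?_, hp⟩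
      intro a ha
      have hxy : x ≤ y := by simp [desc] at hd; omega
      rcases List.mem_cons.mp ha with rfl | ha
      · exact hxy
      · exact le_trans hxy (List.rel_of_pairwise_cons hp ha)
    · intro h
      have hxy : x ≤ y := List.rel_of_pairwise_cons h (by simp)
      have hd : desc (x, y) = false := by simp [desc]; omega
      rw [hd, ih.mpr (List.pairwise_cons.mp h).2]
      simp

-- splitting off the wrap pair
theorem zip_wrap : ∀ (t : List Int) (x z : Int),
    ((x :: t).zip (t ++ [z])).countP desc
      = ((x :: t).zip t).countP desc + (if desc ((x :: t).getLast (by simp), z) then 1 else 0)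
  | [], x, z => by simp [List.countP_cons]
  | y :: t, x, z => by
    have ih := zip_wrap t y z
    simp only [List.cons_append, List.zip_cons_cons, List.countP_cons] at *
    rw [List.getLast_cons_cons, ih]
    ring

theorem cdesc_cons (x : Int) (t : List Int) :
    cdesc (x :: t) = ((x :: t).zip t).countP desc
      + (if desc ((x :: t).getLast (by simp), x) then 1 else 0) := by
  unfold cdesc
  rw [show (x :: t).rotate 1 = t ++ [x] by rw [List.rotate_cons_succ, List.rotate_zero]]
  exact zip_wrap t x x

theorem cdesc_sorted_le (l : List Int) (h : l.Pairwise (· ≤ ·)) : cdesc l ≤ 1 := by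
  cases l with
  | nil => simp [cdesc]
  | cons x t =>
    rw [cdesc_cons]
    have h0 : (((x :: t).zip (x :: t).tail).countP desc) = 0 := (zip_tail_zero_iff _).mpr h
    simp only [List.tail_cons] at h0
    rw [h0]
    split <;> omega

theorem split_of_one : ∀ (l : List Int), (l.zip l.tail).countP desc = 1 →
    ∃ xs ys : List Int, l = xs ++ ys ∧ xs ≠ [] ∧ ys ≠ [] ∧
      xs.Pairwise (· ≤ ·) ∧ ys.Pairwise (· ≤ ·)
  | [] => by simp
  | [x] => by simp
  | x :: y :: t => by
    intro h
    simp only [List.tail_cons, List.zip_cons_cons, List.countP_cons] at h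
    by_cases hd : desc (x, y) = true
    · have h0 : ((y :: t).zip t).countP desc = 0 := by rw [hd] at h; simpa using h
      have hp : (y :: t).Pairwise (· ≤ ·) := by
        have := (zip_tail_zero_iff (y :: t)).mp (by simpa using h0)
        exact this
      exact ⟨[x], y :: t, by simp, by simp, by simp, by simp, hp⟩
    · have hd' : desc (x, y) = false := by simpa using hd
      have h1 : ((y :: t).zip t).countP desc = 1 := by rw [hd'] at h; simpa using h
      obtain ⟨xs, ys, heq, hxs, hys, hpxs, hpys⟩ :=
        split_of_one (y :: t) (by simpa using h1)
      cases xs with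
      | nil => exact absurd rfl hxs
      | cons a xs' =>
        have ha : a = y := by
          have := congrArg (fun l => l.head?) heq
          simpa using this.symm
        subst ha
        have hxa : x ≤ a := by simp [desc] at hd'; omega
        refine ⟨x :: a :: xs', ys, by simp [heq], by simp, hys, ?_, hpys⟩
        refine List.pairwise_cons.mpr ⟨?_, hpxs⟩
        intro b hb
        rcases List.mem_cons.mp hb with rfl | hb
        · exact hxa
        · exact le_trans hxa (List.rel_of_pairwise_cons hpxs hb)

theorem le_getLast_of_pairwise : ∀ (l : List Int), l.Pairwise (· ≤ ·) →
    ∀ p ∈ l, ∀ (hne : l ≠ []), p ≤ l.getLast hne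
  | [], _, p, hp, hne => by simp at hp
  | [x], _, p, hp, hne => by simp at hp; simp [hp]
  | x :: y :: t, h, p, hp, hne => by
    rw [List.getLast_cons_cons]
    rcases List.mem_cons.mp hp with rfl | hp'
    · exact List.rel_of_pairwise_cons h (List.getLast_mem _)
    · exact le_getLast_of_pairwise (y :: t) (List.pairwise_cons.mp h).2 p hp' (by simp)

theorem head_le_of_pairwise (l : List Int) (h : l.Pairwise (· ≤ ·))
    (p : Int) (hp : p ∈ l) (hne : l ≠ []) : l.head hne ≤ p := by
  cases l with
  | nil => exact absurd rfl hne
  | cons x t =>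
    rcases List.mem_cons.mp hp with rfl | hp'
    · simp
    · exact List.rel_of_pairwise_cons h hp'

theorem main_iff (nums : List Int) (h : nums ≠ []) :
    cdesc nums ≤ 1 ↔
      ∃ j : Nat, j < nums.length ∧ (PySem.List.sorted nums (fun x => x) false).rotate j = nums := by
  constructor
  · intro hc
    cases nums with
    | nil => exact absurd rfl h
    | cons x t =>
      rw [cdesc_cons] at hc
      by_cases hA0 : ((x :: t).zip t).countP desc = 0
      · have hp : (x :: t).Pairwise (· ≤ ·) := by
          have := zip_tail_zero_iff (x :: t)
          simp only [List.tail_cons] at this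
          exact this.mp hA0
        refine ⟨0, by simp, ?_⟩
        rw [List.rotate_zero]
        exact PySem.List.sorted_id_eq_of_perm_of_pairwise _ _ (List.Perm.refl _) hp
      · by_cases hA1 : ((x :: t).zip t).countP desc = 1
        · have hW : desc ((x :: t).getLast (by simp), x) = false := by
            cases hdW : desc ((x :: t).getLast (by simp), x)
            · rfl
            · rw [hA1, hdW] at hc; simp at hc
          have hle : (x :: t).getLast (by simp) ≤ x := by
            simp only [desc, decide_eq_false_iff_not, not_lt] at hW
            exact hW
          obtain ⟨xs, ys, heq, hxs, hys, hpxs, hpys⟩ := split_of_one (x :: t) (by simpa using hA1)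
          -- the last element of ys is the last element of x :: t
          have hlast : ys.getLast hys = (x :: t).getLast (by simp) := by
            have h1 : (x :: t).getLast? = ys.getLast? := by
              rw [heq]; exact List.getLast?_append_of_ne_nil xs hys
            have h2 := List.getLast?_eq_some_getLast (l := x :: t) (by simp)
            have h3 := List.getLast?_eq_some_getLast hys
            rw [h2, h3] at h1
            exact (Option.some.inj h1).symm
          -- the head of xs is x
          have hhead : xs.head hxs = x := by
            cases xs with
            | nil => exact absurd rfl hxs
            | cons a xs' =>
              have hxa : x = a := by
                have := congrArg (fun l => l.head?) heq
                simpa using this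
              simpa using hxa.symm
          have hcross : ∀ p ∈ ys, ∀ q ∈ xs, p ≤ q := by
            intro p hp q hq
            have h1 : p ≤ ys.getLast hys := le_getLast_of_pairwise ys hpys p hp hys
            have h2 : xs.head hxs ≤ q := head_le_of_pairwise xs hpxs q hq hxs
            calc p ≤ ys.getLast hys := h1
              _ = (x :: t).getLast (by simp) := hlast
              _ ≤ x := hle
              _ = xs.head hxs := hhead.symm
              _ ≤ q := h2
          have hsorted : PySem.List.sorted (x :: t) (fun v => v) false = ys ++ xs := by
            apply PySem.List.sorted_id_eq_of_perm_of_pairwise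
            · rw [heq]; exact List.perm_append_comm
            · rw [List.pairwise_append]; exact ⟨hpys, hpxs, hcross⟩
          have hxl : 0 < xs.length := List.length_pos_of_ne_nil hxs
          have hlen : (x :: t).length = xs.length + ys.length := by rw [heq]; simp
          refine ⟨ys.length, by omega, ?_⟩
          rw [hsorted, List.rotate_eq_drop_append_take (by simp), List.drop_left, List.take_left]
          exact heq.symm
        · exfalso
          split at hc <;> omega
  · rintro ⟨j, hj, hrot⟩
    have hlen : (PySem.List.sorted nums (fun x => x) false).length = nums.length :=
      PySem.List.length_sorted _ _ _
    have hp : (PySem.List.sorted nums (fun x => x) false).Pairwise (· ≤ ·) := by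
      have := PySem.List.sorted_pairwise nums (fun x => x)
      simpa using this
    calc cdesc nums = cdesc ((PySem.List.sorted nums (fun x => x) false).rotate j) := by rw [hrot]
      _ = cdesc (PySem.List.sorted nums (fun x => x) false) := cdesc_rotate _ j (by omega)
      _ ≤ 1 := cdesc_sorted_le _ hp

-- ===== VERDICT (by name: the statement is the Claim_ definition above) =====
theorem check_spec : Claim_equal_check := by
  intro nums _
  unfold Spec_check
  rcases List.eq_nil_or_concat nums with h | h
  · subst h; rfl
  · have hne : nums ≠ [] := by rcases h with ⟨a, b, rfl⟩; simp
    rw [check_eq_cdesc]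
    by_cases hc : cdesc nums ≤ 1
    · have := (check_alt_iff nums hne).mpr ((main_iff nums hne).mp hc)
      simp [hc, this]
    · have : ¬ check_alt nums = true := fun hb => hc ((main_iff nums hne).mpr ((check_alt_iff nums hne).mp hb))
      simp [hc]; simpa using this
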